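-- pv_equiv track=rewrite | github.com/Vladimir83-bit/doc_search_bot | bot/utils/advanced_search.py | search_by_metadata
-- ===== SOURCE A (Python) =====
-- def search_by_metadata(files_metadata, search_params):
--     """Поиск по метаданным файлов"""
--     results = []
--     for file_meta in files_metadata:
--         match = True
--         for key, value in search_params.items():
--             if key in file_meta and value.lower() not in str(file_meta.get(key, '')).lower():
--                 match = False
--                 break
--         if match:
--             results.append(file_meta)
--     return results
-- ===== SOURCE B (Python) =====
-- def search_by_metadata(files_metadata, search_params):
--     """Поиск по метаданным файлов (param-outer filtering passes)"""
--     results = list(files_metadata)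
--     for key, value in search_params.items():
--         needle = value.lower()
--         results = [f for f in results
--                    if key not in f or needle in str(f.get(key, '')).lower()]
--     return results
-- ===== Notes on version B (the rewrite author's own statement) =====
-- stated objective: alternative
-- what changed: Loop nesting inverted: B iterates over the search params, each pass filtering the shrinking survivor list (lowercasing each needle once per param), instead of A's file-outer loop with an inner per-param early break.
import Mathlib
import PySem

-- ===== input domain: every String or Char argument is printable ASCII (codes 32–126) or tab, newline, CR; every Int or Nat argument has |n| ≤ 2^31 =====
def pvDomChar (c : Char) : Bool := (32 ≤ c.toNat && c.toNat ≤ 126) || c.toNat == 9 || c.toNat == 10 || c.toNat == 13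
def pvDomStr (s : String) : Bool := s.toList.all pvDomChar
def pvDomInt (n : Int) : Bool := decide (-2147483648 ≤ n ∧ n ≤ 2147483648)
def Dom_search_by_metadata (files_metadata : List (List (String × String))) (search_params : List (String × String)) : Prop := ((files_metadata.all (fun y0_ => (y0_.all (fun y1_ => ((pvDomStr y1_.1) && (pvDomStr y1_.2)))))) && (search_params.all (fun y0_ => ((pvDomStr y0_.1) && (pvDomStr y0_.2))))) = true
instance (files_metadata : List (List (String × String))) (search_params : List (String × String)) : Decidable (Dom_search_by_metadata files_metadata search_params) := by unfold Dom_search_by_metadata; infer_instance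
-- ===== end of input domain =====

-- B inverts the loop nesting (one filtering pass per search param over the shrinking survivor
-- list) instead of A's file-outer loop with an inner per-param early break; same cost, alternative structure.

-- ===== PORT A =====
-- pyMatchLoop ps file = A's inner for-loop over search_params.items() with early break
def pyMatchLoop (file : PySem.Dict String String) : List (String × String) → Bool
  | [] => true
  | (k, v) :: rest =>
    if (file.contains k && !(PySem.Str.isIn (PySem.Str.lower v) (PySem.Str.lower (file.getD k "")))) then
      false
    else pyMatchLoop file rest

def search_by_metadata (files_metadata : List (List (String × String))) (search_params : List (String × String)) : List (List (String × String)) :=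
  files_metadata.foldl
    (fun results file_meta =>
      if pyMatchLoop (PySem.Dict.mk file_meta) search_params then results ++ [file_meta] else results)
    []

-- ===== PORT B =====
-- B: one filtering pass over the survivor list per search param (loop nesting inverted).
def search_by_metadata_alt (files_metadata : List (List (String × String))) (search_params : List (String × String)) : List (List (String × String)) :=
  search_params.foldl
    (fun results kv =>
      let needle := PySem.Str.lower kv.2
      results.filter (fun f =>
        !(PySem.Dict.mk f).contains kv.1 ||
          PySem.Str.isIn needle (PySem.Str.lower ((PySem.Dict.mk f).getD kv.1 ""))))
    files_metadata

-- ===== PRECONDITION & SPEC =====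
def Spec_search_by_metadata (files_metadata : List (List (String × String))) (search_params : List (String × String)) (out : List (List (String × String))) : Prop := out = search_by_metadata_alt files_metadata search_params
instance (files_metadata : List (List (String × String))) (search_params : List (String × String)) (out : List (List (String × String))) : Decidable (Spec_search_by_metadata files_metadata search_params out) := by unfold Spec_search_by_metadata; infer_instance

-- ===== CLAIM (what is proved, stated in full; the proofs are below) =====
def Claim_equal_search_by_metadata : Prop := ∀ (files_metadata : List (List (String × String))) (search_params : List (String × String)), Dom_search_by_metadata files_metadata search_params → Spec_search_by_metadata files_metadata search_params (search_by_metadata files_metadata search_params)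

-- ===== LEMMAS AND PROOFS =====

-- the per-file keep predicate both programs test
def keepP (kv : String × String) (f : List (String × String)) : Bool :=
  !(PySem.Dict.mk f).contains kv.1 ||
    PySem.Str.isIn (PySem.Str.lower kv.2) (PySem.Str.lower ((PySem.Dict.mk f).getD kv.1 ""))

theorem pyMatchLoop_eq_all (f : List (String × String)) (ps : List (String × String)) :
    pyMatchLoop (PySem.Dict.mk f) ps = ps.all (fun kv => keepP kv f) := by
  induction ps with
  | nil => rfl
  | cons kv rest ih =>
    obtain ⟨k, v⟩ := kv
    simp only [pyMatchLoop, List.all_cons, ih, keepP]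
    cases h1 : (PySem.Dict.mk f).contains k <;>
      cases h2 : PySem.Str.isIn (PySem.Str.lower v) (PySem.Str.lower ((PySem.Dict.mk f).getD k "")) <;>
      simp [h1, h2]

theorem portA_eq_filter (fs : List (List (String × String))) (ps : List (String × String)) (acc : List (List (String × String))) :
    fs.foldl (fun results file_meta =>
        if pyMatchLoop (PySem.Dict.mk file_meta) ps then results ++ [file_meta] else results) acc
      = acc ++ fs.filter (fun f => ps.all (fun kv => keepP kv f)) := by
  induction fs generalizing acc with
  | nil => simp
  | cons f rest ih =>
    simp only [List.foldl_cons, List.filter_cons, pyMatchLoop_eq_all] at ih ⊢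
    by_cases h : (ps.all (fun kv => keepP kv f)) = true <;>
      simp only [h, if_pos, Bool.false_eq_true, ite_false, ih, List.append_assoc,
        List.singleton_append]

theorem portB_eq_filter (ps : List (String × String)) (fs : List (List (String × String))) :
    search_by_metadata_alt fs ps = fs.filter (fun f => ps.all (fun kv => keepP kv f)) := by
  induction ps generalizing fs with
  | nil => simp [search_by_metadata_alt]
  | cons kv rest ih =>
    simp only [search_by_metadata_alt, List.foldl_cons] at *
    rw [ih, List.filter_filter]
    congr 1
    funext f
    simp only [List.all_cons, keepP]
    exact (Bool.and_comm _ _)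

-- ===== VERDICT (by name: the statement is the Claim_ definition above) =====
theorem search_by_metadata_spec : Claim_equal_search_by_metadata := by
  intro fs ps _
  unfold Spec_search_by_metadata search_by_metadata
  rw [portA_eq_filter, portB_eq_filter]
  simp
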